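-- pv_equiv track=rewrite | github.com/meistro57/Misfits | src/core/simulation_modes.py | filter_available_actions
-- ===== SOURCE A (Python) =====
-- from typing import Dict, List, Any, Optional
--
-- def filter_available_actions(actions: List[str]) -> List[str]:
--     """Prioritize meaningful, relationship-building actions."""
--     meaningful_actions = ['talk', 'socialize', 'work', 'reflect', 'help']
--
--     filtered = []
--     for action in meaningful_actions:
--         if action in actions:
--             filtered.append(action)
--
--     # Deprioritize shallow actions
--     shallow_actions = ['prank', 'show_off']
--     for action in actions:
--         if action not in filtered and action not in shallow_actions:
--             filtered.append(action)
--
--     # Add shallow actions at the end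
--     for action in shallow_actions:
--         if action in actions:
--             filtered.append(action)
--
--     return filtered
-- ===== SOURCE B (Python) =====
-- def filter_available_actions(actions):
--     """Prioritize meaningful, relationship-building actions."""
--     meaningful_actions = ['talk', 'socialize', 'work', 'reflect', 'help']
--     shallow_actions = ['prank', 'show_off']
--
--     deduped = list(dict.fromkeys(actions))
--     n = len(deduped)
--
--     def key_of(i, a):
--         if a in meaningful_actions:
--             return meaningful_actions.index(a)
--         if a in shallow_actions:
--             return len(meaningful_actions) + n + shallow_actions.index(a)
--         return len(meaningful_actions) + i
--
--     keyed = []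
--     for i, a in enumerate(deduped):
--         keyed.append((key_of(i, a), a))
--     keyed.sort(key=lambda p: p[0])
--     return [a for _, a in keyed]
-- ===== Notes on version B (the rewrite author's own statement) =====
-- stated objective: faster
-- what changed: Replaces A's three scanning passes (with a linear 'not in filtered' membership test inside the middle loop) by a single dedup followed by one stable sort of the deduped list under an integer priority key (meaningful fixed-list index, then appearance index, then shallow fixed-list index).
import Mathlib
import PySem

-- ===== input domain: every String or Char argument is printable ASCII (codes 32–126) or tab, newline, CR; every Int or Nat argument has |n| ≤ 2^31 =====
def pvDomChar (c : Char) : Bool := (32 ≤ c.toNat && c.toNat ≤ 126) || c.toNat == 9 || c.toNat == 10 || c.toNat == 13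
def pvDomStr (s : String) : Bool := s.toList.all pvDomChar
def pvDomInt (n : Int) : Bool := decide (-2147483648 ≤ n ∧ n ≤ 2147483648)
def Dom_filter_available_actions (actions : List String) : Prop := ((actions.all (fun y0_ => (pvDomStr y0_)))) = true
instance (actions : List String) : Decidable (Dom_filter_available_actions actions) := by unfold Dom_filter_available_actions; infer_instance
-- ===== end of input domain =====

-- B replaces A's three scanning passes (quadratic 'not in filtered' middle loop) by one dedup
-- followed by a single stable sort under an integer priority key (objective: faster).

def pvMeaningful : List String := ["talk", "socialize", "work", "reflect", "help"]
def pvShallow : List String := ["prank", "show_off"]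

-- ===== PORT A =====
def filter_available_actions (actions : List String) : List String :=
  let filtered1 := pvMeaningful.foldl
    (fun acc action => if actions.contains action then acc ++ [action] else acc) []
  let filtered2 := actions.foldl
    (fun acc action => if !acc.contains action && !pvShallow.contains action then acc ++ [action] else acc) filtered1
  pvShallow.foldl
    (fun acc action => if actions.contains action then acc ++ [action] else acc) filtered2

-- ===== PORT B =====
def pvKeyOf (n : Int) (i : Int) (a : String) : Int :=
  if pvMeaningful.contains a then (((PySem.List.index? pvMeaningful a).getD 0 : Nat) : Int)
  else if pvShallow.contains a then
    (pvMeaningful.length : Int) + n + (((PySem.List.index? pvShallow a).getD 0 : Nat) : Int)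
  else (pvMeaningful.length : Int) + i

def filter_available_actions_alt (actions : List String) : List String :=
  let deduped := PySem.List.dedup actions
  let n : Int := (deduped.length : Int)
  let keyed := (PySem.List.enumerate deduped).foldl
    (fun acc p => acc ++ [(pvKeyOf n p.1 p.2, p.2)]) []
  (PySem.List.sorted keyed (fun p => p.1)).map (fun p => p.2)

-- ===== PRECONDITION & SPEC =====
def Spec_filter_available_actions (actions : List String) (out : List String) : Prop := out = filter_available_actions_alt actions
instance (actions : List String) (out : List String) : Decidable (Spec_filter_available_actions actions out) := by unfold Spec_filter_available_actions; infer_instance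

-- ===== CLAIM (what is proved, stated in full; the proofs are below) =====
def Claim_equal_filter_available_actions : Prop := ∀ (actions : List String), Dom_filter_available_actions actions → Spec_filter_available_actions actions (filter_available_actions actions)

-- ===== LEMMAS AND PROOFS =====

-- the key of a meaningful action (independent of n and i)
def pvKM (a : String) : Int := (((PySem.List.index? pvMeaningful a).getD 0 : Nat) : Int)
-- the key of a shallow action
def pvKS (n : Int) (a : String) : Int :=
  (pvMeaningful.length : Int) + n + (((PySem.List.index? pvShallow a).getD 0 : Nat) : Int)

theorem pvKeyOf_of_meaningful (n i : Int) (a : String) (h : a ∈ pvMeaningful) :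
    pvKeyOf n i a = pvKM a := by simp [pvKeyOf, pvKM, h]

theorem pvKeyOf_of_shallow (n i : Int) (a : String) (hm : a ∉ pvMeaningful)
    (hs : a ∈ pvShallow) : pvKeyOf n i a = pvKS n a := by
  simp [pvKeyOf, pvKS, hm, hs]

theorem pvKeyOf_of_other (n i : Int) (a : String) (hm : a ∉ pvMeaningful)
    (hs : a ∉ pvShallow) : pvKeyOf n i a = 5 + i := by
  simp only [pvKeyOf, hm, hs, List.contains_eq_mem, decide_eq_true_eq]
  norm_num [pvMeaningful]

theorem pvKM_le (a : String) (h : a ∈ pvMeaningful) : pvKM a ≤ 4 := by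
  simp [pvMeaningful] at h
  rcases h with rfl | rfl | rfl | rfl | rfl <;> decide

-- PySem.List.dedup at the tail
theorem pvDedup_snoc (xs : List String) (a : String) :
    PySem.List.dedup (xs ++ [a]) =
      if a ∈ PySem.List.dedup xs then PySem.List.dedup xs else PySem.List.dedup xs ++ [a] := by
  simp only [PySem.List.dedup_eq_ofList, PySem.Set.ofList_eq_foldl, List.foldl_append,
    List.foldl_cons, List.foldl_nil]
  simp [PySem.Set.add, PySem.Set.contains]

-- A's middle loop appends the first occurrences of non-shallow actions not already collected
theorem pvMiddle_loop (xs init : List String) :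
    xs.foldl (fun acc a => if !acc.contains a && !pvShallow.contains a then acc ++ [a] else acc) init
      = init ++ (PySem.List.dedup xs).filter (fun a => !init.contains a && !pvShallow.contains a) := by
  induction xs using List.reverseRecOn generalizing init with
  | nil => simp [PySem.List.dedup, PySem.Set.ofList]
  | append_singleton xs a ih =>
    rw [List.foldl_append, ih, List.foldl_cons, List.foldl_nil, pvDedup_snoc]
    by_cases ha : a ∈ PySem.List.dedup xs
    · rw [if_pos ha]
      rw [PySem.List.mem_dedup] at ha
      by_cases hs : a ∈ pvShallow
      · simp [hs]
      · by_cases hi : a ∈ init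
        · simp [hi]
        · simp [List.mem_filter, ha, hi, hs]
    · rw [if_neg ha, List.filter_append]
      rw [PySem.List.mem_dedup] at ha
      by_cases hs : a ∈ pvShallow
      · simp [hs, ha]
      · by_cases hi : a ∈ init
        · simp [hi, hs, ha]
        · simp [hi, hs, ha]

-- the three tiers of the result, as plain lists
def pvF1 (actions : List String) : List String := pvMeaningful.filter (fun a => actions.contains a)
def pvSh (actions : List String) : List String := pvShallow.filter (fun a => actions.contains a)
def pvN (actions : List String) : Int := ((PySem.List.dedup actions).length : Int)
def pvG (actions : List String) (p : Int × String) : Int × String := (pvKeyOf (pvN actions) p.1 p.2, p.2)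
def pvED (actions : List String) : List (Int × String) := PySem.List.enumerate (PySem.List.dedup actions)
def pvRest (actions : List String) : List (Int × String) :=
  (pvED actions).filter (fun p => !(pvMeaningful.contains p.2))
-- the three tiers with their sort keys attached
def pvKeyed1 (actions : List String) : List (Int × String) := (pvF1 actions).map (fun m => (pvKM m, m))
def pvKeyedMid (actions : List String) : List (Int × String) :=
  ((pvRest actions).filter (fun p => !(pvShallow.contains p.2))).map (pvG actions)
def pvKeyedSh (actions : List String) : List (Int × String) :=
  (pvSh actions).map (fun s => (pvKS (pvN actions) s, s))

theorem pvMS_disjoint (a : String) (h : a ∈ pvShallow) : a ∉ pvMeaningful := by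
  simp [pvShallow] at h
  rcases h with rfl | rfl <;> decide

theorem pvFilterSnd (l : List (Int × String)) (q : String → Bool) :
    (l.filter (fun p => q p.2)).map (fun p => p.2) = (l.map (fun p => p.2)).filter q := by
  rw [List.filter_map]; rfl

-- A's value, in closed form
theorem pvA_eq (actions : List String) :
    filter_available_actions actions =
      pvF1 actions ++ ((PySem.List.dedup actions).filter
        (fun a => !(pvMeaningful.contains a) && !(pvShallow.contains a))) ++ pvSh actions := by
  unfold filter_available_actions
  rw [PySem.List.foldl_append_if_eq_filter, pvMiddle_loop, PySem.List.foldl_append_if_eq_filter]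
  simp only [List.nil_append]
  have h : ∀ a ∈ PySem.List.dedup actions,
      (!(pvMeaningful.filter (fun a => actions.contains a)).contains a && !(pvShallow.contains a))
        = (!(pvMeaningful.contains a) && !(pvShallow.contains a)) := by
    intro a ha
    rw [PySem.List.mem_dedup] at ha
    by_cases hm : a ∈ pvMeaningful <;> simp [List.mem_filter, hm, ha]
  rw [List.filter_congr h]
  unfold pvF1 pvSh
  rfl

-- the keyed tiers are a permutation of the keyed dedup list
theorem pvPerm (actions : List String) :
    (pvKeyed1 actions ++ pvKeyedMid actions ++ pvKeyedSh actions).Perm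
      ((pvED actions).map (pvG actions)) := by
  have hDnd : (PySem.List.dedup actions).Nodup := PySem.List.nodup_dedup actions
  have hMnd : pvMeaningful.Nodup := by decide
  have hSnd : pvShallow.Nodup := by decide
  -- tier 1, rewritten as a map over a filter of the dedup list
  have e1 : ((pvED actions).filter (fun p => pvMeaningful.contains p.2)).map (pvG actions)
      = ((PySem.List.dedup actions).filter (fun a => pvMeaningful.contains a)).map
          (fun m => (pvKM m, m)) := by
    have h : ((pvED actions).filter (fun p => pvMeaningful.contains p.2)).map (pvG actions)
        = ((pvED actions).filter (fun p => pvMeaningful.contains p.2)).map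
            ((fun m => (pvKM m, m)) ∘ (fun p : Int × String => p.2)) := by
      apply List.map_congr_left
      intro p hp
      have hm : p.2 ∈ pvMeaningful := by
        have := (List.mem_filter.mp hp).2; simpa using this
      simp [pvG, Function.comp, pvKeyOf_of_meaningful _ _ _ hm]
    rw [h, ← List.map_map,
      pvFilterSnd (pvED actions) (fun a => pvMeaningful.contains a)]
    unfold pvED
    rw [PySem.List.map_snd_enumerate]
  -- tier 3, rewritten likewise
  have e3 : ((pvRest actions).filter (fun p => pvShallow.contains p.2)).map (pvG actions)
      = (((PySem.List.dedup actions).filter (fun a => !pvMeaningful.contains a)).filter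
          (fun a => pvShallow.contains a)).map (fun s => (pvKS (pvN actions) s, s)) := by
    have h : ((pvRest actions).filter (fun p => pvShallow.contains p.2)).map (pvG actions)
        = ((pvRest actions).filter (fun p => pvShallow.contains p.2)).map
            ((fun s => (pvKS (pvN actions) s, s)) ∘ (fun p : Int × String => p.2)) := by
      apply List.map_congr_left
      intro p hp
      have hs : p.2 ∈ pvShallow := by
        have := (List.mem_filter.mp hp).2; simpa using this
      have hm : p.2 ∉ pvMeaningful := by
        have := (List.mem_filter.mp (List.mem_of_mem_filter hp : p ∈ pvRest actions)).2
        simpa using this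
      simp [pvG, Function.comp, pvKeyOf_of_shallow _ _ _ hm hs]
    rw [h, ← List.map_map,
      pvFilterSnd (pvRest actions) (fun a => pvShallow.contains a)]
    unfold pvRest
    rw [pvFilterSnd (pvED actions) (fun a => !pvMeaningful.contains a)]
    unfold pvED
    rw [PySem.List.map_snd_enumerate]
  -- tier 1 permutation
  have p1 : (pvKeyed1 actions).Perm
      (((pvED actions).filter (fun p => pvMeaningful.contains p.2)).map (pvG actions)) := by
    rw [e1]
    unfold pvKeyed1
    apply List.Perm.map
    apply (List.perm_ext_iff_of_nodup (hMnd.filter _) (hDnd.filter _)).mpr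
    intro a
    simp only [List.mem_filter, PySem.List.mem_dedup, List.contains_eq_mem,
      decide_eq_true_eq]
    tauto
  -- tier 3 permutation
  have p3 : (pvKeyedSh actions).Perm
      (((pvRest actions).filter (fun p => pvShallow.contains p.2)).map (pvG actions)) := by
    rw [e3]
    unfold pvKeyedSh
    apply List.Perm.map
    apply (List.perm_ext_iff_of_nodup (hSnd.filter _) ((hDnd.filter _).filter _)).mpr
    intro a
    simp only [List.mem_filter, PySem.List.mem_dedup, List.contains_eq_mem,
      decide_eq_true_eq, Bool.not_eq_true', decide_eq_false_iff_not]
    constructor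
    · rintro ⟨hs, ha⟩
      exact ⟨⟨ha, pvMS_disjoint a hs⟩, hs⟩
    · rintro ⟨⟨ha, _⟩, hs⟩
      exact ⟨hs, ha⟩
  -- assemble
  have step1 : (pvKeyed1 actions ++ pvKeyedMid actions ++ pvKeyedSh actions).Perm
      ((((pvED actions).filter (fun p => pvMeaningful.contains p.2)).map (pvG actions)
        ++ pvKeyedMid actions)
        ++ ((pvRest actions).filter (fun p => pvShallow.contains p.2)).map (pvG actions)) :=
    (p1.append (List.Perm.refl _)).append p3
  apply step1.trans
  have hmid : (((pvRest actions).filter (fun p => pvShallow.contains p.2)).map (pvG actions)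
      ++ pvKeyedMid actions)
      = ((pvRest actions).filter (fun p => pvShallow.contains p.2)
          ++ (pvRest actions).filter (fun p => !pvShallow.contains p.2)).map (pvG actions) := by
    unfold pvKeyedMid
    rw [List.map_append]
  have step2 : ((((pvED actions).filter (fun p => pvMeaningful.contains p.2)).map (pvG actions)
        ++ pvKeyedMid actions)
        ++ ((pvRest actions).filter (fun p => pvShallow.contains p.2)).map (pvG actions)).Perm
      (((pvED actions).filter (fun p => pvMeaningful.contains p.2)).map (pvG actions)
        ++ (((pvRest actions).filter (fun p => pvShallow.contains p.2)
          ++ (pvRest actions).filter (fun p => !pvShallow.contains p.2)).map (pvG actions))) := by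
    rw [List.append_assoc, ← hmid]
    exact List.Perm.append_left _ List.perm_append_comm
  apply step2.trans
  have step3 : (((pvRest actions).filter (fun p => pvShallow.contains p.2)
      ++ (pvRest actions).filter (fun p => !pvShallow.contains p.2)).map (pvG actions)).Perm
      ((pvRest actions).map (pvG actions)) :=
    (List.filter_append_perm _ _).map _
  apply (List.Perm.append_left _ step3).trans
  rw [← List.map_append]
  apply List.Perm.map
  unfold pvRest
  exact List.filter_append_perm _ _

-- the keyed tiers are strictly increasing in the key
theorem pvPairwise (actions : List String) :
    (pvKeyed1 actions ++ pvKeyedMid actions ++ pvKeyedSh actions).Pairwise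
      (fun p q => p.1 < q.1) := by
  have hN0 : 0 ≤ pvN actions := by unfold pvN; positivity
  -- key bounds for the three tiers
  have hb1 : ∀ x ∈ pvKeyed1 actions, x.1 ≤ 4 := by
    intro x hx
    obtain ⟨m, hm, rfl⟩ := List.mem_map.mp hx
    exact pvKM_le m (List.mem_of_mem_filter hm)
  have hb2 : ∀ x ∈ pvKeyedMid actions, ∃ i : Int, 0 ≤ i ∧ i < pvN actions ∧ x.1 = 5 + i := by
    intro x hx
    obtain ⟨p, hp, rfl⟩ := List.mem_map.mp hx
    have hs : p.2 ∉ pvShallow := by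
      have := (List.mem_filter.mp hp).2; simpa using this
    have hp' : p ∈ pvRest actions := List.mem_of_mem_filter hp
    have hm : p.2 ∉ pvMeaningful := by
      have := (List.mem_filter.mp hp').2; simpa using this
    have hpe : p ∈ pvED actions := List.mem_of_mem_filter hp'
    obtain ⟨k, hk, hpk⟩ := (PySem.List.mem_enumerate_iff _ _ _).mp hpe
    refine ⟨p.1, ?_, ?_, ?_⟩
    · rw [hpk]; omega
    · rw [hpk]; show (0:Int) + (k:Int) < pvN actions; unfold pvN; omega
    · show (pvG actions p).1 = 5 + p.1
      simp [pvG, pvKeyOf_of_other _ _ _ hm hs]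
  have hb3 : ∀ x ∈ pvKeyedSh actions, 5 + pvN actions ≤ x.1 := by
    intro x hx
    obtain ⟨s, hs, rfl⟩ := List.mem_map.mp hx
    show 5 + pvN actions ≤ pvKS (pvN actions) s
    unfold pvKS
    have : (0 : Int) ≤ (((PySem.List.index? pvShallow s).getD 0 : Nat) : Int) := by positivity
    norm_num [pvMeaningful]
  -- each tier is strictly increasing in the key
  have pw1 : (pvKeyed1 actions).Pairwise (fun p q => p.1 < q.1) := by
    apply List.pairwise_map.mpr
    have hM : pvMeaningful.Pairwise (fun a b => pvKM a < pvKM b) := by decide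
    exact (hM.filter _)
  have pw2 : (pvKeyedMid actions).Pairwise (fun p q => p.1 < q.1) := by
    apply List.pairwise_map.mpr
    have h0 : (pvED actions).Pairwise (fun p q => p.1 < q.1) :=
      PySem.List.pairwise_lt_enumerate _ _
    have h1 : ((pvRest actions).filter (fun p => !pvShallow.contains p.2)).Pairwise
        (fun p q => p.1 < q.1) := (h0.filter _).filter _
    apply h1.imp_of_mem
    intro p q hp hq hlt
    have hsp : p.2 ∉ pvShallow := by have := (List.mem_filter.mp hp).2; simpa using this
    have hmp : p.2 ∉ pvMeaningful := by
      have := (List.mem_filter.mp (List.mem_of_mem_filter hp : p ∈ pvRest actions)).2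
      simpa using this
    have hsq : q.2 ∉ pvShallow := by have := (List.mem_filter.mp hq).2; simpa using this
    have hmq : q.2 ∉ pvMeaningful := by
      have := (List.mem_filter.mp (List.mem_of_mem_filter hq : q ∈ pvRest actions)).2
      simpa using this
    show (pvG actions p).1 < (pvG actions q).1
    simp [pvG, pvKeyOf_of_other _ _ _ hmp hsp, pvKeyOf_of_other _ _ _ hmq hsq]
    omega
  have pw3 : (pvKeyedSh actions).Pairwise (fun p q => p.1 < q.1) := by
    apply List.pairwise_map.mpr
    have hS : pvShallow.Pairwise
        (fun a b => pvKS (pvN actions) a < pvKS (pvN actions) b) := by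
      unfold pvShallow
      refine List.pairwise_cons.mpr ⟨?_, List.pairwise_singleton _ _⟩
      intro b hb
      simp only [List.mem_singleton] at hb
      subst hb
      unfold pvKS
      norm_num [PySem.List.index?, pvShallow]
      decide
    exact hS.filter _
  -- combine with the cross-tier bounds
  rw [List.pairwise_append]
  refine ⟨?_, pw3, ?_⟩
  · rw [List.pairwise_append]
    refine ⟨pw1, pw2, ?_⟩
    intro a ha b hb
    obtain ⟨i, hi0, _, hbi⟩ := hb2 b hb
    have := hb1 a ha
    omega
  · intro a ha b hb
    have h3 := hb3 b hb
    rcases List.mem_append.mp ha with h | h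
    · have := hb1 a h
      omega
    · obtain ⟨i, hi0, hin, hai⟩ := hb2 a h
      omega

-- B's value, in closed form
theorem pvB_eq (actions : List String) :
    filter_available_actions_alt actions =
      pvF1 actions ++ ((PySem.List.dedup actions).filter
        (fun a => !(pvMeaningful.contains a) && !(pvShallow.contains a))) ++ pvSh actions := by
  show ((PySem.List.sorted ((PySem.List.enumerate (PySem.List.dedup actions)).foldl
      (fun acc p => acc ++ [(pvKeyOf ((PySem.List.dedup actions).length : Int) p.1 p.2, p.2)]) [])
      (fun p => p.1)).map (fun p => p.2)) = _
  rw [PySem.List.foldl_append_singleton_eq_map, List.nil_append]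
  have hs : PySem.List.sorted ((PySem.List.enumerate (PySem.List.dedup actions)).map
      (fun p => (pvKeyOf ((PySem.List.dedup actions).length : Int) p.1 p.2, p.2))) (fun p => p.1)
      = pvKeyed1 actions ++ pvKeyedMid actions ++ pvKeyedSh actions := by
    apply PySem.List.sorted_eq_of_perm_of_pairwise_lt
    · exact pvPerm actions
    · exact pvPairwise actions
  rw [hs]
  simp only [List.map_append]
  have h1 : (pvKeyed1 actions).map (fun p => p.2) = pvF1 actions := by
    unfold pvKeyed1; rw [List.map_map]; exact List.map_id'' (fun _ => rfl) _
  have h3 : (pvKeyedSh actions).map (fun p => p.2) = pvSh actions := by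
    unfold pvKeyedSh; rw [List.map_map]; exact List.map_id'' (fun _ => rfl) _
  have h2 : (pvKeyedMid actions).map (fun p => p.2) =
      (PySem.List.dedup actions).filter
        (fun a => !(pvMeaningful.contains a) && !(pvShallow.contains a)) := by
    unfold pvKeyedMid pvRest pvED
    rw [List.map_map]
    have : (fun p : Int × String => p.2) ∘ pvG actions = (fun p : Int × String => p.2) := rfl
    rw [this,
      pvFilterSnd ((PySem.List.enumerate (PySem.List.dedup actions)).filter
          (fun p => !pvMeaningful.contains p.2))
        (fun a => !pvShallow.contains a),
      pvFilterSnd (PySem.List.enumerate (PySem.List.dedup actions))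
        (fun a => !pvMeaningful.contains a),
      PySem.List.map_snd_enumerate, List.filter_filter]
    apply List.filter_congr
    intro a _
    cases pvMeaningful.contains a <;> cases pvShallow.contains a <;> rfl
  rw [h1, h2, h3]

-- ===== VERDICT (by name: the statement is the Claim_ definition above) =====
theorem filter_available_actions_spec : Claim_equal_filter_available_actions := by
  intro actions _
  unfold Spec_filter_available_actions
  rw [pvA_eq, pvB_eq]
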